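-- pv_equiv track=rewrite | github.com/sdegen95/AI-Seminar-ML | Gal-conjecture/Updated/gal_july24.py | h_vector
-- ===== SOURCE A (Python) =====
-- import math
--
-- def h_vector(f_vec):
--     h_vec = []
--     d = len(f_vec)-1
--
--     for k in range(d+1):
--         h_k = 0
--         for i in range(k+1):
--             h_k += (-1)**(k-i)*math.comb(d-i,k-i)*f_vec[i]
--         h_vec.append(h_k)
--
--     return h_vec
-- ===== SOURCE B (Python) =====
-- def h_vector(f_vec):
--     # Horner evaluation of h(x) = sum_i f_i * x^i * (1-x)^(d-i):
--     # maintain the coefficient list of Q_j = sum_{i<=j} f_i x^i (1-x)^(j-i),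
--     # updating it as Q_j = (1-x)*Q_{j-1} + f_j x^j -- no binomials needed.
--     h = []
--     for j, fj in enumerate(f_vec):
--         h = [(h[t] if t < j else fj) - (h[t - 1] if t > 0 else 0) for t in range(j + 1)]
--     return h
-- ===== Notes on version B (the rewrite author's own statement) =====
-- stated objective: faster
-- what changed: B replaces the double sum of signed binomial coefficients by a Horner-style loop that maintains the coefficient list of Q_j = sum_{i<=j} f_i x^i (1-x)^(j-i), updating it as Q_j = (1-x)Q_{j-1} + f_j x^j, so no binomial coefficient is ever computed.
import Mathlib
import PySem

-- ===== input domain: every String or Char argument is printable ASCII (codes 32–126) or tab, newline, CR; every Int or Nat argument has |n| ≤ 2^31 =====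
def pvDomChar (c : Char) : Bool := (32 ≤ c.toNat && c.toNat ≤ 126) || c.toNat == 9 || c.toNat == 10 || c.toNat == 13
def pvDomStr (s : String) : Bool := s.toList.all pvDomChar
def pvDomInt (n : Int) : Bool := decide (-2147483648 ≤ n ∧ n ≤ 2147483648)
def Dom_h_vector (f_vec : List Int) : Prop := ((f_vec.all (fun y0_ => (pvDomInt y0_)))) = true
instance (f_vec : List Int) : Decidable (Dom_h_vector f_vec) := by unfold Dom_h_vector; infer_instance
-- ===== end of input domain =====

-- B computes the same h-vector by a Horner-style (1-x)-multiplication loop instead of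
-- summing signed binomial coefficients: asymptotically faster (no math.comb calls).

-- ===== PORT A =====
-- range(d+1) with d = len(f_vec)-1 has exactly f_vec.length elements, so the outer loop
-- is List.range f_vec.length; inside it k ≤ d and i ≤ k, so the Nat subtractions
-- k-i and len-1-i equal Python's, (-1)**(k-i) has a nonnegative exponent, math.comb
-- never sees a negative argument (= Nat.choose), and f_vec[i] is always in range
-- (= getD i 0). Exact on every input.
def h_vector (f_vec : List Int) : List Int :=
  (List.range f_vec.length).foldl (fun h_vec k =>
    h_vec ++ [(List.range (k+1)).foldl (fun h_k i =>
      h_k + (-1 : Int)^(k - i) * ((f_vec.length - 1 - i).choose (k - i) : Int) * f_vec.getD i 0) 0]) []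

-- ===== PORT B =====
-- one step of Source B's loop body: the list comprehension over range(j+1)
-- (indices t < j and t-1 < j are always in range for the current h, = getD _ 0)
def altStepB (j : Nat) (h : List Int) (fj : Int) : List Int :=
  (List.range (j+1)).map (fun t =>
    (if t < j then h.getD t 0 else fj) - (if 0 < t then h.getD (t-1) 0 else 0))

-- 'for j, fj in enumerate(f_vec)': fold carrying (h, j)
def h_vector_alt (f_vec : List Int) : List Int :=
  (f_vec.foldl (fun (s : List Int × Nat) fj => (altStepB s.2 s.1 fj, s.2 + 1))
    (([] : List Int), (0 : Nat))).1

-- ===== PRECONDITION & SPEC =====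
def Spec_h_vector (f_vec : List Int) (out : List Int) : Prop := out = h_vector_alt f_vec
instance (f_vec : List Int) (out : List Int) : Decidable (Spec_h_vector f_vec out) := by unfold Spec_h_vector; infer_instance

-- ===== CLAIM (what is proved, stated in full; the proofs are below) =====
def Claim_equal_h_vector : Prop := ∀ (f_vec : List Int), Dom_h_vector f_vec → Spec_h_vector f_vec (h_vector f_vec)

-- ===== LEMMAS AND PROOFS =====

-- coefficient t of Q_j = ∑_{i≤j} f_i x^i (1-x)^(j-i)  (the invariant of B's loop;
-- for j = f.length it is A's k-th output)
def coefB (f : List Int) (j t : Nat) : Int :=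
  ∑ i ∈ Finset.range (t+1), (-1 : Int)^(t-i) * ((j-1-i).choose (t-i) : Int) * f.getD i 0

theorem sum_map_range (g : Nat → Int) (n : Nat) :
    ((List.range n).map g).sum = ∑ i ∈ Finset.range n, g i := by
  induction n with
  | zero => simp
  | succ m ih => simp [List.range_succ, Finset.sum_range_succ, ih]

theorem foldl_append_single {α β : Type} (g : α → β) (l : List α) (acc : List β) :
    l.foldl (fun a x => a ++ [g x]) acc = acc ++ l.map g := by
  induction l generalizing acc with
  | nil => simp
  | cons x xs ih => simp [ih]

theorem foldl_add_g {α : Type} (g : α → Int) (l : List α) (x : Int) :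
    l.foldl (fun a i => a + g i) x = x + (l.map g).sum := by
  induction l generalizing x with
  | nil => simp
  | cons y ys ih => simp [ih, add_assoc]

theorem A_char (f : List Int) :
    h_vector f = (List.range f.length).map (fun k => coefB f f.length k) := by
  unfold h_vector
  rw [foldl_append_single]
  refine (List.nil_append _).trans (List.map_congr_left fun k _ => ?_)
  rw [foldl_add_g, zero_add, sum_map_range, coefB]

theorem getD_map_range (g : Nat → Int) {j t : Nat} (h : t < j) :
    ((List.range j).map g).getD t 0 = g t := by
  simp [List.getD_eq_getElem?_getD, h]

theorem step_lemma (f : List Int) (a : Int) (t : Nat) (ht : t ≤ f.length) :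
    (if t < f.length then coefB f f.length t else a)
      - (if 0 < t then coefB f f.length (t-1) else 0)
      = coefB (f ++ [a]) (f.length + 1) t := by
  set j := f.length with hj
  have hget : ∀ i : Nat, i < j → (f ++ [a]).getD i 0 = f.getD i 0 := by
    intro i hi
    simp [List.getD_eq_getElem?_getD, List.getElem?_append_left hi]
  have hgetj : (f ++ [a]).getD j 0 = a := by
    simp [List.getD_eq_getElem?_getD, hj]
  symm
  -- expand coefB (f++[a]) (j+1) t, split off the i = t term
  rw [coefB, Finset.sum_range_succ]
  have hlast : (-1 : Int)^(t-t) * (((j+1)-1-t).choose (t-t) : Int) * (f ++ [a]).getD t 0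
      = (f ++ [a]).getD t 0 := by simp
  rw [hlast]
  -- Pascal on every i < t
  have hsplit : ∑ i ∈ Finset.range t,
      (-1 : Int)^(t-i) * (((j+1)-1-i).choose (t-i) : Int) * (f ++ [a]).getD i 0
      = (∑ i ∈ Finset.range t, (-1 : Int)^(t-i) * ((j-1-i).choose (t-i) : Int) * f.getD i 0)
        + (∑ i ∈ Finset.range t, (-1 : Int)^(t-i) * ((j-1-i).choose (t-1-i) : Int) * f.getD i 0) := by
    rw [← Finset.sum_add_distrib]
    refine Finset.sum_congr rfl fun i hi => ?_
    have hit : i < t := Finset.mem_range.mp hi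
    have hij : i < j := lt_of_lt_of_le hit ht
    have hpascal : ((j+1)-1-i).choose (t-i) = (j-1-i).choose (t-1-i) + (j-1-i).choose (t-i) := by
      have h1 : (j+1)-1-i = (j-1-i) + 1 := by omega
      have h2 : t-i = (t-1-i) + 1 := by omega
      rw [h1, h2, Nat.choose_succ_succ]
    rw [hget i hij, hpascal]
    push_cast
    ring
  rw [hsplit]
  by_cases h0 : 0 < t
  · -- -coefB f j (t-1) equals the second Pascal sum
    have hneg : (∑ i ∈ Finset.range t, (-1 : Int)^(t-i) * ((j-1-i).choose (t-1-i) : Int) * f.getD i 0)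
        = - coefB f j (t-1) := by
      rw [coefB]
      have ht1 : t - 1 + 1 = t := by omega
      rw [ht1, ← Finset.sum_neg_distrib]
      refine Finset.sum_congr rfl fun i hi => ?_
      have hit : i < t := Finset.mem_range.mp hi
      have hexp : t - i = (t-1-i) + 1 := by omega
      rw [hexp, pow_succ]
      ring
    rw [hneg, if_pos h0]
    by_cases htj : t < j
    · -- first Pascal sum + g_t = coefB f j t
      have hcoef : coefB f j t
          = (∑ i ∈ Finset.range t, (-1 : Int)^(t-i) * ((j-1-i).choose (t-i) : Int) * f.getD i 0)
            + f.getD t 0 := by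
        rw [coefB, Finset.sum_range_succ]; simp
      rw [if_pos htj, hcoef, hget t htj]
      ring
    · -- t = j: the first Pascal sum vanishes (choose above the top row)
      have htj' : t = j := by omega
      have hzero : (∑ i ∈ Finset.range t, (-1 : Int)^(t-i) * ((j-1-i).choose (t-i) : Int) * f.getD i 0) = 0 := by
        refine Finset.sum_eq_zero fun i hi => ?_
        have hit : i < t := Finset.mem_range.mp hi
        have : (j-1-i).choose (t-i) = 0 := Nat.choose_eq_zero_of_lt (by omega)
        rw [this]; ring
      rw [if_neg htj, hzero, htj', hgetj]
      ring
  · -- t = 0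
    have ht0 : t = 0 := by omega
    subst ht0
    simp only [Finset.range_zero, Finset.sum_empty, if_neg h0, zero_add, add_zero, sub_zero]
    by_cases hj0 : 0 < j
    · rw [if_pos hj0, hget 0 hj0, coefB]
      simp
    · have hf : f = [] := List.eq_nil_of_length_eq_zero (by omega)
      rw [if_neg hj0, hf]; simp

theorem B_inv (f : List Int) :
    f.foldl (fun (s : List Int × Nat) fj => (altStepB s.2 s.1 fj, s.2 + 1))
        (([] : List Int), (0 : Nat))
      = ((List.range f.length).map (fun t => coefB f f.length t), f.length) := by
  induction f using List.reverseRecOn with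
  | nil => simp
  | append_singleton f a ih =>
    rw [List.foldl_append, ih]
    simp only [List.foldl_cons, List.foldl_nil, List.length_append, List.length_singleton]
    refine Prod.ext ?_ rfl
    show altStepB f.length ((List.range f.length).map (fun t => coefB f f.length t)) a
        = (List.range (f.length + 1)).map (fun t => coefB (f ++ [a]) (f.length + 1) t)
    unfold altStepB
    refine List.map_congr_left fun t htmem => ?_
    have ht : t ≤ f.length := by
      have := List.mem_range.mp htmem; omega
    rw [← step_lemma f a t ht]
    congr 1
    · by_cases h : t < f.length
      · rw [if_pos h, if_pos h, getD_map_range _ h]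
      · rw [if_neg h, if_neg h]
    · by_cases h : 0 < t
      · rw [if_pos h, if_pos h, getD_map_range _ (by omega)]
      · rw [if_neg h, if_neg h]

-- ===== VERDICT (by name: the statement is the Claim_ definition above) =====
theorem h_vector_spec : Claim_equal_h_vector := by
  intro f _
  show h_vector f = h_vector_alt f
  rw [A_char, h_vector_alt, B_inv]
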